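-- pv_equiv track=rewrite | github.com/pypi-data/pypi-mirror-231 | packages/ml3m/ml3m-0.0.20.tar.gz/ml3m-0.0.20/ml3m/_metrics.py | _ngram_counter
-- ===== SOURCE A (Python) =====
-- from collections import Counter
-- from itertools import tee
--
-- def _ngram_counter(seq: list[str], n: int) -> Counter[tuple[str]]:
--     """Generates n-grams and wrap in a counter.
--
--     Parameters
--     ----------
--     seq : list of str
--         The list to generate n-grams of.
--     n : int
--         The degree.
--
--     Returns
--     -------
--     counter : collections.Counter
--         The counter of the n-grams. For instance, the 2-grams of ``[1, 2, 1, 2]`` are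
--         ``[(1, 2), (2, 1), (1, 2)]``, so that ``(1, 2)`` counts twice and ``(2, 1)``
--         counts once. If the length of ``seq`` is greater than the degree, an empty
--         counter will be returned.
--
--     Notes
--     -----
--     The way to generate the n-grams refers to the sample code snippet of
--     :func:`itertools.pairwise`. :func:`itertools.tee` returns n independent iterators.
--     For the ith iterator, consume its first i elements so that their starting element
--     are consecutive. Finally :func:`zip` respects the shortest iterator so that the n-
--     grams are done. See also
--     https://docs.python.org/3/library/itertools.html#itertools.pairwise.
--     """
--     if len(seq) < n:
--         return Counter()
--
--     # https://docs.python.org/3/library/itertools.html#itertools.pairwise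
--     its = tee(seq, n)
--     for i, it in enumerate(its):
--         for _ in range(i):
--             next(it, None)
--     # mypy does not recognize zip as Iterable
--     return Counter(zip(*its))  # type: ignore[arg-type]
-- ===== SOURCE B (Python) =====
-- from collections import Counter, deque
--
--
-- def _ngram_counter(seq: list[str], n: int):
--     """Single streaming pass: a bounded deque carries the current window and the
--     counter is updated incrementally as elements arrive, instead of staging the
--     full collection of n-grams and handing it to Counter at once."""
--     counter = Counter()
--     if n < 1 or len(seq) < n:
--         return counter
--     window = deque(maxlen=n)
--     for item in seq:
--         window.append(item)
--         if len(window) == n: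
--             counter[tuple(window)] += 1
--     return counter
-- ===== Notes on version B (the rewrite author's own statement) =====
-- stated objective: alternative
-- what changed: B replaces A's staged pipeline (tee n iterators, zip them, pass the whole n-gram iterable to Counter) with a single streaming pass that slides a bounded deque over the sequence and increments the counter entry in place at each full window; Pre_ excludes n < 0, where A raises ValueError from itertools.tee (B returns an empty Counter there).
import Mathlib
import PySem

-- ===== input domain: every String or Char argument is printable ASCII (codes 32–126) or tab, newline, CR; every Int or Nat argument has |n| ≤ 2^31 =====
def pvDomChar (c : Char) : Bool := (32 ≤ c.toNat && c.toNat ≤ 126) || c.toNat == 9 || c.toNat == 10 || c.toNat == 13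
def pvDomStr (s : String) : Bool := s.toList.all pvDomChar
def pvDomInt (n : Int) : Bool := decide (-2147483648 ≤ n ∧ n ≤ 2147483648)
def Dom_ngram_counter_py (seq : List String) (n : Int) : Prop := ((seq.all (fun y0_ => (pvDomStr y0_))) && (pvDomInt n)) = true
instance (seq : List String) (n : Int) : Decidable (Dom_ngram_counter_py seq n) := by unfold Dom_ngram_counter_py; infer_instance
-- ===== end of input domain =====

-- B replaces A's staged tee/zip/Counter(iterable) pipeline with one streaming pass
-- that slides a bounded window and bumps the counter in place. Return values only.

-- ===== PORT A =====
-- zip(*its): emit the heads of all iterators while every iterator is nonempty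
-- (zip of ZERO iterators stops immediately); fuel only makes the recursion total.
def pvZipStar (fuel : Nat) (its : List (List String)) : List (List String) :=
  match fuel with
  | 0 => []
  | fuel + 1 =>
    if its.isEmpty then []
    else if its.all (fun l => !l.isEmpty) then
      its.map (fun l => l.headD "") :: pvZipStar fuel (its.map List.tail)
    else []

def ngram_counter_py (seq : List String) (n : Int) : List (List String × Int) :=
  if (seq.length : Int) < n then []   -- Counter()
  else
    -- its = tee(seq, n) with iterator i advanced i times
    let its := (List.range n.toNat).map (fun i => seq.drop i)
    (PySem.Dict.counter (pvZipStar (seq.length + 1) its)).items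

-- ===== PORT B =====
-- one loop iteration: window.append(item) on a deque(maxlen=N) (evicts from the
-- left when over capacity), then bump the counter if the window is full
def pvStepB (N : Nat) (st : List String × PySem.Dict (List String) Int) (x : String) :
    List String × PySem.Dict (List String) Int :=
  let w1 := st.1 ++ [x]
  let w := if N < w1.length then w1.tail else w1
  if w.length = N then (w, st.2.modify w 0 (· + 1)) else (w, st.2)

def ngram_counter_py_alt (seq : List String) (n : Int) : List (List String × Int) :=
  if n < 1 ∨ (seq.length : Int) < n then []
  else ((seq.foldl (pvStepB n.toNat) ([], PySem.Dict.empty)).2).items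

-- ===== PRECONDITION & SPEC =====
-- Pre_ excludes n < 0, where A raises ValueError (itertools.tee).
def Pre_ngram_counter_py (seq : List String) (n : Int) : Prop := 0 ≤ n
instance (seq : List String) (n : Int) : Decidable (Pre_ngram_counter_py seq n) := by unfold Pre_ngram_counter_py; infer_instance
def pvWitness_ngram_counter_py : List String × Int := (["a", "b", "a", "b"], 2)

def Spec_ngram_counter_py (seq : List String) (n : Int) (out : List (List String × Int)) : Prop := out = ngram_counter_py_alt seq n
instance (seq : List String) (n : Int) (out : List (List String × Int)) : Decidable (Spec_ngram_counter_py seq n out) := by unfold Spec_ngram_counter_py; infer_instance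

-- ===== CLAIM (what is proved, stated in full; the proofs are below) =====
def Claim_equal_ngram_counter_py : Prop := ∀ (seq : List String) (n : Int), Dom_ngram_counter_py seq n → Pre_ngram_counter_py seq n → Spec_ngram_counter_py seq n (ngram_counter_py seq n)

-- ===== LEMMAS AND PROOFS =====

-- the heads of the n iterators at position j are the window seq[j:j+n]
lemma pv_heads_window (s : List String) (n j : Nat) (h : j + n ≤ s.length) :
    (List.range n).map (fun i => (s.drop (j + i)).headD "") = (s.drop j).take n := by
  apply List.ext_getElem
  · simp; omega
  · intro i hi hi'
    simp only [List.getElem_map, List.getElem_range, List.getElem_take, List.getElem_drop]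
    rw [List.headD_eq_head?_getD, List.head?_drop]
    rw [List.getElem?_eq_getElem (by simp at hi; omega)]
    rfl

-- zip(*its) from position j yields exactly the windows starting at j, j+1, …
lemma pv_zip_windows (s : List String) (n : Nat) (hn : 0 < n) :
    ∀ (fuel j : Nat), s.length + 1 ≤ fuel + j →
    pvZipStar fuel ((List.range n).map (fun i => s.drop (j + i))) =
      (List.range (s.length + 1 - n - j)).map (fun k => (s.drop (j + k)).take n) := by
  intro fuel
  induction fuel with
  | zero => intro j hj; simp [pvZipStar]; omega
  | succ fuel ih =>
    intro j hj
    by_cases hle : j + n ≤ s.length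
    · rw [pvZipStar]
      rw [if_neg (by simp; omega)]
      rw [if_pos (by
        simp only [List.all_map, List.all_eq_true, List.mem_range]
        intro i hi
        simp only [Function.comp]
        simp
        omega)]
      simp only [List.map_map, Function.comp_def]
      rw [pv_heads_window s n j hle]
      have htails : (List.range n).map (fun i => (s.drop (j + i)).tail)
          = (List.range n).map (fun i => s.drop ((j + 1) + i)) := by
        apply List.map_congr_left
        intro i _
        rw [List.tail_drop]; congr 1; omega
      rw [htails, ih (j + 1) (by omega)]
      have hc : s.length + 1 - n - j = (s.length + 1 - n - (j + 1)) + 1 := by omega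
      rw [hc, List.range_succ_eq_map]
      simp only [List.map_cons, List.map_map, Nat.add_zero]
      congr 1
      apply List.map_congr_left
      intro k _
      simp only [Function.comp]
      congr 2; omega
    · rw [pvZipStar]
      rw [if_neg (by simp; omega)]
      rw [if_neg (by
        simp only [List.all_map, List.all_eq_true, List.mem_range]
        intro hall
        have := hall (n - 1) (by omega)
        simp only [Function.comp] at this
        simp at this
        omega)]
      have : s.length + 1 - n - j = 0 := by omega
      rw [this]; simp

-- the window held by the deque after j elements: the last min(j,N) of seq[:j]
def pvWin (seq : List String) (N j : Nat) : List String := (seq.take j).drop (j - N)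

-- the full windows still to be recorded when j elements have been processed
def pvWinsFrom (seq : List String) (N j : Nat) : List (List String) :=
  (List.range' (max N (j + 1)) (seq.length + 1 - max N (j + 1))).map
    (fun e => (seq.take e).drop (e - N))

-- one loop step sends the window at j to the window at j+1, bumping iff full
lemma pv_step_win (seq : List String) (N j : Nat) (hj : j < seq.length)
    (d : PySem.Dict (List String) Int) :
    pvStepB N (pvWin seq N j, d) seq[j]
      = (pvWin seq N (j + 1),
         if N ≤ j + 1 then d.modify (pvWin seq N (j + 1)) 0 (· + 1) else d) := by
  have hwin1 : pvWin seq N j ++ [seq[j]] = (seq.take (j + 1)).drop (j - N) := by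
    rw [pvWin, List.take_succ, List.getElem?_eq_getElem hj]
    rw [List.drop_append_of_le_length (by simp; omega)]
    rfl
  have hlen : ((seq.take (j + 1)).drop (j - N)).length = (j + 1) - (j - N) := by
    simp; omega
  unfold pvStepB
  simp only [hwin1]
  by_cases hjN : N ≤ j
  · have htail : ((seq.take (j + 1)).drop (j - N)).tail = pvWin seq N (j + 1) := by
      rw [List.tail_drop, pvWin]; congr 1; omega
    have hwl : (pvWin seq N (j + 1)).length = N := by
      rw [pvWin]; simp; omega
    have h1 : (if N < ((seq.take (j + 1)).drop (j - N)).length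
        then ((seq.take (j + 1)).drop (j - N)).tail
        else (seq.take (j + 1)).drop (j - N)) = pvWin seq N (j + 1) := by
      rw [if_pos (by rw [hlen]; omega), htail]
    rw [h1, if_pos hwl, if_pos (by omega)]
  · have hw : (seq.take (j + 1)).drop (j - N) = pvWin seq N (j + 1) := by
      rw [pvWin]; congr 1; omega
    have hwl : (pvWin seq N (j + 1)).length = j + 1 := by
      rw [pvWin]; simp; omega
    have h1 : (if N < ((seq.take (j + 1)).drop (j - N)).length
        then ((seq.take (j + 1)).drop (j - N)).tail
        else (seq.take (j + 1)).drop (j - N)) = pvWin seq N (j + 1) := by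
      rw [if_neg (by rw [hlen]; omega), hw]
    rw [h1]
    by_cases hfull : N ≤ j + 1
    · rw [if_pos (show (pvWin seq N (j + 1)).length = N by rw [hwl]; omega), if_pos hfull]
    · rw [if_neg (show ¬ (pvWin seq N (j + 1)).length = N by rw [hwl]; omega), if_neg hfull]

-- loop invariant: resuming the fold at position j records exactly pvWinsFrom j
lemma pv_b_loop (seq : List String) (N : Nat) (hNL : N ≤ seq.length) :
    ∀ (k j : Nat) (d : PySem.Dict (List String) Int), j + k = seq.length →
    ((seq.drop j).foldl (pvStepB N) (pvWin seq N j, d)).2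
      = (pvWinsFrom seq N j).foldl (fun d t => d.modify t 0 (· + 1)) d := by
  intro k
  induction k with
  | zero =>
    intro j d hjk
    have hj : j = seq.length := by omega
    subst hj
    rw [List.drop_length]
    have : max N (seq.length + 1) = seq.length + 1 := by omega
    simp [pvWinsFrom, this]
  | succ k ih =>
    intro j d hjk
    have hj : j < seq.length := by omega
    rw [List.drop_eq_getElem_cons hj, List.foldl_cons, pv_step_win seq N j hj d]
    rw [ih (j + 1) _ (by omega)]
    by_cases hfull : N ≤ j + 1
    · rw [if_pos hfull]
      have h1 : max N (j + 1) = j + 1 := by omega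
      have h2 : max N (j + 2) = j + 2 := by omega
      have h3 : seq.length + 1 - (j + 1) = (seq.length + 1 - (j + 2)) + 1 := by omega
      rw [pvWinsFrom, pvWinsFrom, h1, h2, h3, List.range'_succ]
      simp only [List.map_cons, List.foldl_cons]
      rfl
    · rw [if_neg hfull]
      have h1 : max N (j + 1) = N := by omega
      have h2 : max N (j + 2) = N := by omega
      rw [pvWinsFrom, pvWinsFrom, h1, h2]

-- the windows recorded over the whole pass are A's n-gram list
lemma pv_winsFrom_zero (seq : List String) (N : Nat) (hN : 0 < N) :
    pvWinsFrom seq N 0 = (List.range (seq.length + 1 - N)).map (fun k => (seq.drop k).take N) := by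
  rw [pvWinsFrom]
  have h1 : max N (0 + 1) = N := by omega
  rw [h1, List.range'_eq_map_range]
  simp only [List.map_map]
  apply List.map_congr_left
  intro k _
  simp only [Function.comp]
  have hk : N + k - N = k := by omega
  rw [List.drop_take, hk]
  congr 1
  omega

-- ===== VERDICT (by name: the statement is the Claim_ definition above) =====
theorem ngram_counter_py_spec : Claim_equal_ngram_counter_py := by
  intro seq n _ hpre
  unfold Spec_ngram_counter_py ngram_counter_py ngram_counter_py_alt
  by_cases h0 : n < 1
  · -- n = 0 (Pre_ gives 0 ≤ n): A zips zero iterators, B's guard fires; both empty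
    have hn0 : n = 0 := le_antisymm (by omega) hpre
    subst hn0
    rw [if_neg (by omega), if_pos (Or.inl (by norm_num))]
    simp [pvZipStar, PySem.Dict.counter, PySem.Dict.empty]
  · by_cases hlt : (seq.length : Int) < n
    · rw [if_pos hlt, if_pos (Or.inr hlt)]
    · rw [if_neg hlt, if_neg (by omega)]
      have hN1 : 0 < n.toNat := by omega
      have hNle : n.toNat ≤ seq.length := by omega
      have hB := pv_b_loop seq n.toNat hNle (seq.length) 0 PySem.Dict.empty (by omega)
      rw [List.drop_zero] at hB
      have hw0 : pvWin seq n.toNat 0 = [] := by simp [pvWin]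
      rw [hw0] at hB
      rw [hB, pv_winsFrom_zero seq n.toNat hN1]
      have hA := pv_zip_windows seq n.toNat hN1 (seq.length + 1) 0 (by omega)
      simp only [Nat.zero_add, Nat.sub_zero] at hA
      simp only [hA]
      rfl
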